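-- pv_equiv track=rewrite | github.com/TeppeiSudo/kyopro_educational_90_python | sol/67.py | solve
-- ===== SOURCE A (Python) =====
-- def solve(n):
--     sN = str(n)
--     num = 0
--     for i, n in enumerate(reversed(sN)):
--         num += int(n)*(8**i)
--
--     if num == 0:
--         nano = "0"
--     else:
--         nano = ""
--         while num > 0:
--             nano = str(num%9) + nano
--             num //= 9
--
--     res = ""
--     for s in nano:
--         if s == "8":
--             res += "5"
--         else:
--             res += s
--     return res
-- ===== SOURCE B (Python) =====
-- def _expand(carry):
--     if carry <= 0:
--         return []
--     return [carry % 9] + _expand(carry // 9)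
--
--
-- def _mul8add(digits, carry):
--     # base-9 little-endian digit vector: digits * 8 + carry, schoolbook carry propagation
--     if not digits:
--         return _expand(carry)
--     c = carry + 8 * digits[0]
--     return [c % 9] + _mul8add(digits[1:], c // 9)
--
--
-- def solve(n):
--     digits = [0]  # base-9 digits (least significant first) of the value decoded so far
--     for ch in str(n):
--         digits = _mul8add(digits, int(ch))
--     return "".join("5" if d == 8 else str(d) for d in reversed(digits))
-- ===== Notes on version B (the rewrite author's own statement) =====
-- stated objective: alternative
-- what changed: B never materializes the decoded integer: it maintains the result directly as a base-9 little-endian digit vector and, for each decimal character, performs a schoolbook multiply-by-8-and-add with carry propagation over that vector (recursive helpers), then remaps and joins the reversed digits; A instead builds one big integer from powers of 8 and extracts base-9 digits from it afterwards with a division loop plus a separate remap pass.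
import Mathlib
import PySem

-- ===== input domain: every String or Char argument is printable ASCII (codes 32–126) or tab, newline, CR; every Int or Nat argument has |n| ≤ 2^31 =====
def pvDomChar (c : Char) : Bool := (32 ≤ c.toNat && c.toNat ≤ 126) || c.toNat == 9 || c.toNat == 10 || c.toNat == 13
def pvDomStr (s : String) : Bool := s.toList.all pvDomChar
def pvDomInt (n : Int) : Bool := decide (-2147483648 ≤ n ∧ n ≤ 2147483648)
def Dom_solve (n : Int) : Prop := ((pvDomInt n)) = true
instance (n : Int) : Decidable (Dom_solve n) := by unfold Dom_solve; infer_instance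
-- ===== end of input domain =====

-- B maintains the answer directly as a base-9 little-endian digit vector, updating it with a
-- schoolbook multiply-by-8-and-add carry propagation per decimal character; the decoded integer
-- is never materialized (objective: alternative).

-- int(c) for a single character c (exact via PySem.Int.ofChars?); within Pre_solve every
-- character fed to it is a decimal digit, so the `.getD 0` default is never reached.
def pyIntChar (c : Char) : Int := (PySem.Int.ofChars? [c]).getD 0

-- termination measure for the division loops (cited in decreasing_by)
theorem floordiv9_toNat_lt (num : Int) (h : 0 < num) :
    (PySem.Int.floordiv num 9).toNat < num.toNat := by
  simp only [PySem.Int.floordiv, Int.fdiv_eq_ediv]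
  omega

-- ===== PORT A =====
-- A's `while num > 0: nano = str(num%9) + nano; num //= 9`
def nanoLoopA (num : Int) (nano : List Char) : List Char :=
  if h : 0 < num then
    nanoLoopA (PySem.Int.floordiv num 9) (PySem.Int.toChars (PySem.Int.mod num 9) ++ nano)
  else nano
termination_by num.toNat
decreasing_by exact floordiv9_toNat_lt num h

def solve (n : Int) : String :=
  let sN := PySem.Int.toChars n
  let num := (PySem.List.enumerate sN.reverse).foldl
      (fun acc p => acc + pyIntChar p.2 * (8 : Int) ^ p.1.toNat) 0
  let nano := if num = 0 then ['0'] else nanoLoopA num []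
  let res := nano.foldl (fun r c => if c = '8' then r ++ ['5'] else r ++ [c]) ([] : List Char)
  String.ofList res

-- ===== PORT B =====
-- B's `_expand(carry)`: remaining digits of a nonnegative carry (the `carry <= 0` guard also
-- gives Lean termination; inside Pre_solve carry is never negative)
def expandB (carry : Int) : List Int :=
  if h : 0 < carry then PySem.Int.mod carry 9 :: expandB (PySem.Int.floordiv carry 9) else []
termination_by carry.toNat
decreasing_by exact floordiv9_toNat_lt carry h

-- B's `_mul8add(digits, carry)`: digit vector times 8 plus carry, carry propagated
def mul8addB : List Int → Int → List Int
  | [], carry => expandB carry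
  | d :: t, carry =>
    let c := carry + 8 * d
    PySem.Int.mod c 9 :: mul8addB t (PySem.Int.floordiv c 9)

def solve_alt (n : Int) : String :=
  let digits := (PySem.Int.toChars n).foldl (fun ds ch => mul8addB ds (pyIntChar ch)) [0]
  String.ofList (digits.reverse.map (fun d => if d = 8 then ['5'] else PySem.Int.toChars d)).flatten

-- ===== PRECONDITION & SPEC =====
-- Pre_ excludes exactly n < 0: there str(n) starts with '-' and int('-') raises ValueError in A (and in B).
def Pre_solve (n : Int) : Prop := 0 ≤ n
instance (n : Int) : Decidable (Pre_solve n) := by unfold Pre_solve; infer_instance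
def pvWitness_solve : Int := (89)

def Spec_solve (n : Int) (out : String) : Prop := out = solve_alt n
instance (n : Int) (out : String) : Decidable (Spec_solve n out) := by unfold Spec_solve; infer_instance

-- ===== CLAIM (what is proved, stated in full; the proofs are below) =====
def Claim_equal_solve : Prop := ∀ (n : Int), Dom_solve n → Pre_solve n → Spec_solve n (solve n)

-- ===== LEMMAS AND PROOFS =====

-- ---- A's decode equals the left-to-right Horner value of the digit characters ----

-- weighted sum of digits, most significant first (weight 8^(positions to the right))
def powsum : List Char → Int
  | [] => 0
  | c :: t => pyIntChar c * (8 : Int) ^ t.length + powsum t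

-- weighted sum, least significant first, starting weight 8^k
def lsum : List Char → Nat → Int
  | [], _ => 0
  | c :: t, k => pyIntChar c * (8 : Int) ^ k + lsum t (k + 1)

theorem lsum_append (a b : List Char) (k : Nat) :
    lsum (a ++ b) k = lsum a k + lsum b (k + a.length) := by
  induction a generalizing k with
  | nil => simp [lsum]
  | cons c t ih =>
    simp only [List.cons_append, lsum, ih (k + 1), List.length_cons]
    ring_nf

theorem lsum_reverse (l : List Char) : lsum l.reverse 0 = powsum l := by
  induction l with
  | nil => rfl
  | cons c t ih =>
    simp only [List.reverse_cons, lsum_append, powsum, ih, List.length_reverse, lsum]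
    ring

-- A's decode loop computes acc + lsum
theorem enumFold_eq_lsum (l : List Char) (k : Nat) (acc : Int) :
    (PySem.List.enumerate l (k : Int)).foldl
      (fun acc p => acc + pyIntChar p.2 * (8 : Int) ^ p.1.toNat) acc
    = acc + lsum l k := by
  induction l generalizing k acc with
  | nil => simp [PySem.List.enumerate_nil, lsum]
  | cons c t ih =>
    rw [PySem.List.enumerate_cons]
    simp only [List.foldl_cons]
    have : ((k : Int) + 1) = ((k + 1 : Nat) : Int) := by push_cast; ring
    rw [this, ih]
    simp only [lsum, Int.toNat_natCast]
    ring

-- the Horner value (the quantity B tracks implicitly through its digit vector)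
theorem horner_eq_powsum (l : List Char) (acc : Int) :
    l.foldl (fun acc c => acc * 8 + pyIntChar c) acc
    = acc * (8 : Int) ^ l.length + powsum l := by
  induction l generalizing acc with
  | nil => simp [powsum]
  | cons c t ih =>
    simp only [List.foldl_cons, ih, powsum, List.length_cons]
    ring

-- ---- every character str(n) produces, n ≥ 0, has nonnegative int() value ----

theorem pyIntChar_digitChar (k : Nat) (hk : k < 10) : 0 ≤ pyIntChar (Nat.digitChar k) := by
  interval_cases k <;> decide

theorem toDigitsCore_nonneg (f : Nat) :
    ∀ (m : Nat) (l : List Char), (∀ c ∈ l, 0 ≤ pyIntChar c) →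
    ∀ c ∈ Nat.toDigitsCore 10 f m l, 0 ≤ pyIntChar c := by
  induction f with
  | zero => intro m l hl; simpa [Nat.toDigitsCore] using hl
  | succ f ih =>
    intro m l hl c hc
    simp only [Nat.toDigitsCore] at hc
    have hd : ∀ c ∈ Nat.digitChar (m % 10) :: l, 0 ≤ pyIntChar c := by
      intro c hc
      rcases List.mem_cons.mp hc with h | h
      · subst h; exact pyIntChar_digitChar _ (Nat.mod_lt _ (by omega))
      · exact hl _ h
    split at hc
    · exact hd _ hc
    · exact ih _ _ hd _ hc

theorem toChars_nonneg (n : Int) (hn : 0 ≤ n) :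
    ∀ c ∈ PySem.Int.toChars n, 0 ≤ pyIntChar c := by
  simp only [PySem.Int.toChars, if_neg (by omega : ¬ n < 0)]
  exact toDigitsCore_nonneg _ _ _ (by simp)

-- ---- B's digit vector tracks the canonical base-9 digits ----

-- `pad v` = B's digit vector when the value decoded so far is v (for v = 0 it is [0])
def pad (v : Int) : List Int := PySem.Int.mod v 9 :: expandB (PySem.Int.floordiv v 9)

theorem pad_zero : pad 0 = [0] := by
  unfold pad
  rw [expandB, dif_neg (by norm_num)]
  decide

theorem pad_pos (v : Int) (hv : 0 < v) : pad v = expandB v := by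
  rw [expandB, dif_pos hv]; rfl

-- the core carry-propagation correctness: multiplying the canonical digits by 8 and adding c
theorem mul8add_expand (v : Int) :
    0 ≤ v → ∀ c : Int, 0 ≤ c → mul8addB (expandB v) c = expandB (8 * v + c) := by
  induction v using expandB.induct with
  | case1 v h ih =>
    intro hv c hc
    have hq : 0 ≤ PySem.Int.floordiv v 9 ∧ 0 ≤ PySem.Int.mod v 9 ∧ PySem.Int.mod v 9 < 9 ∧
        v = 9 * PySem.Int.floordiv v 9 + PySem.Int.mod v 9 := by
      simp only [PySem.Int.floordiv, PySem.Int.mod, Int.fdiv_eq_ediv, Int.fmod_eq_emod]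
      omega
    obtain ⟨hq0, hr0, hr9, hv9⟩ := hq
    have hEv : expandB v = PySem.Int.mod v 9 :: expandB (PySem.Int.floordiv v 9) := by
      rw [expandB, dif_pos h]
    have hEc : expandB (8 * v + c)
        = PySem.Int.mod (8 * v + c) 9 :: expandB (PySem.Int.floordiv (8 * v + c) 9) := by
      rw [expandB, dif_pos (by omega)]
    have hc' : 0 ≤ PySem.Int.floordiv (c + 8 * PySem.Int.mod v 9) 9 := by
      simp only [PySem.Int.floordiv, Int.fdiv_eq_ediv]
      omega
    have h1 : PySem.Int.mod (8 * v + c) 9 = PySem.Int.mod (c + 8 * PySem.Int.mod v 9) 9 := by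
      simp only [PySem.Int.mod, Int.fmod_eq_emod]
      omega
    have h2 : PySem.Int.floordiv (8 * v + c) 9
        = 8 * PySem.Int.floordiv v 9 + PySem.Int.floordiv (c + 8 * PySem.Int.mod v 9) 9 := by
      simp only [PySem.Int.floordiv, PySem.Int.mod, Int.fdiv_eq_ediv, Int.fmod_eq_emod]
      omega
    rw [hEv, hEc, h1, h2]
    simp only [mul8addB]
    rw [ih hq0 _ hc']
  | case2 v h =>
    intro hv c hc
    have hv0 : v = 0 := by omega
    subst hv0
    rw [expandB, dif_neg (by omega)]
    simp only [mul8addB]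
    norm_num

-- one decode step on B's (possibly [0]-padded) vector
theorem mul8add_pad (v : Int) (hv : 0 ≤ v) (c : Int) (hc : 0 ≤ c) :
    mul8addB (pad v) c = pad (8 * v + c) := by
  by_cases hz : v = 0
  · subst hz
    rw [pad_zero]
    simp only [mul8addB, pad]
    norm_num
  · have hpos : 0 < v := by omega
    rw [pad_pos v hpos, mul8add_expand v hv c hc, pad_pos _ (by omega)]

theorem foldPad (l : List Char) (hl : ∀ c ∈ l, 0 ≤ pyIntChar c) :
    ∀ v : Int, 0 ≤ v →
    l.foldl (fun ds ch => mul8addB ds (pyIntChar ch)) (pad v)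
      = pad (l.foldl (fun a ch => a * 8 + pyIntChar ch) v) := by
  induction l with
  | nil => intro v hv; rfl
  | cons ch t ih =>
    intro v hv
    have hch : 0 ≤ pyIntChar ch := hl ch (List.mem_cons_self)
    simp only [List.foldl_cons]
    rw [mul8add_pad v hv _ hch,
      show (8 * v + pyIntChar ch) = v * 8 + pyIntChar ch by ring,
      ih (fun c hc => hl c (List.mem_cons_of_mem _ hc)) _ (by omega)]

-- Horner fold stays nonnegative
theorem horner_nonneg (l : List Char) (hl : ∀ c ∈ l, 0 ≤ pyIntChar c) :
    ∀ v : Int, 0 ≤ v → 0 ≤ l.foldl (fun a ch => a * 8 + pyIntChar ch) v := by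
  induction l with
  | nil => intro v hv; simpa using hv
  | cons c t ih =>
    intro v hv
    simp only [List.foldl_cons]
    exact ih (fun c hc => hl c (List.mem_cons_of_mem _ hc))
      _ (by have := hl c (List.mem_cons_self); positivity)

-- A's base-9 digit characters, most significant first
def base9 (num : Int) : List Char :=
  if h : 0 < num then
    base9 (PySem.Int.floordiv num 9) ++ PySem.Int.toChars (PySem.Int.mod num 9)
  else []
termination_by num.toNat
decreasing_by exact floordiv9_toNat_lt num h

theorem nanoLoopA_eq (num : Int) (nano : List Char) :
    nanoLoopA num nano = base9 num ++ nano := by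
  induction num, nano using nanoLoopA.induct with
  | case1 num nano h ih =>
    rw [nanoLoopA, base9, dif_pos h, dif_pos h, ih, List.append_assoc]
  | case2 num nano h =>
    rw [nanoLoopA, base9, dif_neg h, dif_neg h, List.nil_append]

def remap (c : Char) : Char := if c = '8' then '5' else c

theorem resFold_eq_map (l : List Char) (acc : List Char) :
    l.foldl (fun r c => if c = '8' then r ++ ['5'] else r ++ [c]) acc = acc ++ l.map remap := by
  induction l generalizing acc with
  | nil => simp
  | cons c t ih =>
    simp only [List.foldl_cons, List.map_cons, ih, remap]
    split <;> simp

-- B's remapped digit pieces, read most significant first, spell A's remapped characters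
theorem flat_piece (v : Int) :
    ((expandB v).reverse.map (fun d => if d = 8 then ['5'] else PySem.Int.toChars d)).flatten
      = (base9 v).map remap := by
  induction v using expandB.induct with
  | case1 v h ih =>
    rw [expandB, dif_pos h, base9, dif_pos h]
    simp only [List.reverse_cons, List.map_append, List.flatten_append, ih]
    congr 1
    have hm : 0 ≤ PySem.Int.mod v 9 ∧ PySem.Int.mod v 9 < 9 := by
      simp only [PySem.Int.mod, Int.fmod_eq_emod]; omega
    obtain ⟨h1, h2⟩ := hm
    set r := PySem.Int.mod v 9 with hrdef
    interval_cases r <;> decide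
  | case2 v h =>
    rw [expandB, dif_neg h, base9, dif_neg h]
    rfl

-- ===== VERDICT (by name: the statement is the Claim_ definition above) =====
theorem solve_spec : Claim_equal_solve := by
  intro n _ hn
  unfold Spec_solve solve solve_alt
  simp only
  have hchars := toChars_nonneg n hn
  have hnum : (PySem.List.enumerate (PySem.Int.toChars n).reverse).foldl
      (fun acc p => acc + pyIntChar p.2 * (8 : Int) ^ p.1.toNat) 0
      = (PySem.Int.toChars n).foldl (fun acc c => acc * 8 + pyIntChar c) 0 := by
    have h0 : ((0 : Nat) : Int) = (0 : Int) := rfl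
    rw [horner_eq_powsum, ← h0, enumFold_eq_lsum, lsum_reverse]
    ring
  rw [hnum]
  set v := (PySem.Int.toChars n).foldl (fun acc c => acc * 8 + pyIntChar c) 0 with hvdef
  have hB : (PySem.Int.toChars n).foldl (fun ds ch => mul8addB ds (pyIntChar ch)) [0] = pad v := by
    rw [← pad_zero, foldPad _ hchars 0 le_rfl]
  rw [hB]
  have hv0 : 0 ≤ v := horner_nonneg _ hchars 0 le_rfl
  by_cases hz : v = 0
  · rw [hz, if_pos rfl, resFold_eq_map, pad_zero]
    decide
  · rw [if_neg hz, nanoLoopA_eq, List.append_nil, resFold_eq_map, List.nil_append,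
      pad_pos v (by omega), flat_piece]
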